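-- pv_equiv track=rewrite | github.com/wadelamble/constrained-improvisation | scripts/writing_agent.py | gather_section_items
-- ===== SOURCE A (Python) =====
-- from collections import Counter, defaultdict
--
-- SECTION_NAMES = [
--     "Project",
--     "Audience",
--     "Principles",
--     "Structural Decisions",
--     "Terminology Preferences",
--     "Reusable Phrasing",
--     "Open Questions",
--     "Evidence Notes",
-- ]
--
-- def unique_items(items: list[str]) -> list[str]:
--     seen = set()
--     result = []
--     for item in items:
--         key = item.casefold()
--         if key in seen:
--             continue
--         seen.add(key)
--         result.append(item)
--     return result
--
-- def gather_section_items(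
--     summaries: list[dict[str, list[str] | str]],
-- ) -> dict[str, list[str]]:
--     collected: dict[str, list[str]] = defaultdict(list)
--     for summary in summaries:
--         for section in SECTION_NAMES:
--             items = summary.get(section, [])
--             if isinstance(items, list):
--                 collected[section].extend(items)
--     return {section: unique_items(items) for section, items in collected.items()}
-- ===== SOURCE B (Python) =====
-- SECTION_NAMES = [
--     "Project",
--     "Audience",
--     "Principles",
--     "Structural Decisions",
--     "Terminology Preferences",
--     "Reusable Phrasing",
--     "Open Questions",
--     "Evidence Notes",
-- ]
--
-- def gather_section_items(
--     summaries: list[dict[str, list[str] | str]],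
-- ) -> dict[str, list[str]]:
--     # single fused pass: dedup while collecting, never materialising pre-dedup lists
--     result: dict[str, list[str]] = {}
--     seen: dict[str, set[str]] = {}
--     for summary in summaries:
--         for section in SECTION_NAMES:
--             items = summary.get(section, [])
--             if isinstance(items, list):
--                 bucket = result.setdefault(section, [])
--                 keys = seen.setdefault(section, set())
--                 for item in items:
--                     key = item.casefold()
--                     if key not in keys:
--                         keys.add(key)
--                         bucket.append(item)
--     return result
-- ===== Notes on version B (the rewrite author's own statement) =====
-- stated objective: alternative
-- what changed: Replaces A's two-phase collect-then-dedup (accumulate all items per section in a defaultdict, then run unique_items over each list) with a single fused pass that dedups while collecting via a per-section seen-key dict, never materialising the pre-dedup lists.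
import Mathlib
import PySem

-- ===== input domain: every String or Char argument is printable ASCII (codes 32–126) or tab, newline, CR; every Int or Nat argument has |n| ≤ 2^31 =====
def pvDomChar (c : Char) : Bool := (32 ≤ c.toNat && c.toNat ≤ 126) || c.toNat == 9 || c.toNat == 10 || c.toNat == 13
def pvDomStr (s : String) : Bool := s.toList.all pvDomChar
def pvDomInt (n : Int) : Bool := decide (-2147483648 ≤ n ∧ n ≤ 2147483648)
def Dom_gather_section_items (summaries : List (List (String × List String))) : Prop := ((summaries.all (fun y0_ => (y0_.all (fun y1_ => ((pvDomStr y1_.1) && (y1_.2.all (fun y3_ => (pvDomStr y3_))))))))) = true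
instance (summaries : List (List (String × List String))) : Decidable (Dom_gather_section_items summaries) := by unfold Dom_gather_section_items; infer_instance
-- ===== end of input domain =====

set_option maxHeartbeats 1600000


-- B fuses A's collect-then-dedup into one pass (different decomposition, same cost); casefold = lower on the ASCII domain.
-- Under the type convention the dict values are always lists, so A's `isinstance(items, list)` branch is always taken.

-- ===== PORT A =====
def pvSectionNames : List String :=
  ["Project", "Audience", "Principles", "Structural Decisions",
   "Terminology Preferences", "Reusable Phrasing", "Open Questions", "Evidence Notes"]

def unique_items (items : List String) : List String :=
  (items.foldl (fun (st : PySem.Set String × List String) item =>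
      let key := PySem.Str.lower item
      if PySem.Set.contains st.1 key then st
      else (PySem.Set.add st.1 key, st.2 ++ [item]))
    (PySem.Set.empty, [])).2

-- the final dict comprehension iterates collected.items (unique keys), so it is the value-map over the items list
def gather_section_items (summaries : List (List (String × List String))) : List (String × List String) :=
  let collected : PySem.Dict String (List String) :=
    summaries.foldl (fun c summary =>
      pvSectionNames.foldl (fun c sec =>
        let items := PySem.Dict.getD (PySem.Dict.mk summary) sec []
        c.insert sec (c.getD sec [] ++ items)) c)
      PySem.Dict.empty
  collected.items.map (fun kv => (kv.1, unique_items kv.2))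

-- ===== PORT B =====
def gather_section_items_alt (summaries : List (List (String × List String))) : List (String × List String) :=
  let st :=
    summaries.foldl (fun (st : PySem.Dict String (List String) × PySem.Dict String (PySem.Set String)) summary =>
      pvSectionNames.foldl (fun st sec =>
        let items := PySem.Dict.getD (PySem.Dict.mk summary) sec []
        let p := items.foldl (fun (q : PySem.Set String × List String) item =>
            let key := PySem.Str.lower item
            if PySem.Set.contains q.1 key then q
            else (PySem.Set.add q.1 key, q.2 ++ [item]))
          (PySem.Dict.getD st.2 sec PySem.Set.empty, PySem.Dict.getD st.1 sec [])
        (PySem.Dict.insert st.1 sec p.2, PySem.Dict.insert st.2 sec p.1)) st)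
      (PySem.Dict.empty, PySem.Dict.empty)
  st.1.items

-- ===== PRECONDITION & SPEC =====
def Spec_gather_section_items (summaries : List (List (String × List String))) (out : List (String × List String)) : Prop := out = gather_section_items_alt summaries
instance (summaries : List (List (String × List String))) (out : List (String × List String)) : Decidable (Spec_gather_section_items summaries out) := by unfold Spec_gather_section_items; infer_instance

-- ===== CLAIM (what is proved, stated in full; the proofs are below) =====
def Claim_equal_gather_section_items : Prop := ∀ (summaries : List (List (String × List String))), Dom_gather_section_items summaries → Spec_gather_section_items summaries (gather_section_items summaries)

-- ===== LEMMAS AND PROOFS =====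

-- the shared dedup step and its full fold state (seen keys, kept items)
def pvStep (q : PySem.Set String × List String) (item : String) : PySem.Set String × List String :=
  let key := PySem.Str.lower item
  if PySem.Set.contains q.1 key then q
  else (PySem.Set.add q.1 key, q.2 ++ [item])

def pvD (v : List String) : PySem.Set String × List String :=
  v.foldl pvStep (PySem.Set.empty, [])

def pvAstep (summary : List (String × List String)) (c : PySem.Dict String (List String)) (sec : String) :
    PySem.Dict String (List String) :=
  c.insert sec (c.getD sec [] ++ PySem.Dict.getD (PySem.Dict.mk summary) sec [])

def pvBstep (summary : List (String × List String))
    (st : PySem.Dict String (List String) × PySem.Dict String (PySem.Set String)) (sec : String) :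
    PySem.Dict String (List String) × PySem.Dict String (PySem.Set String) :=
  let p := (PySem.Dict.getD (PySem.Dict.mk summary) sec []).foldl pvStep
    (PySem.Dict.getD st.2 sec PySem.Set.empty, PySem.Dict.getD st.1 sec [])
  (PySem.Dict.insert st.1 sec p.2, PySem.Dict.insert st.2 sec p.1)

def pvInv (c : PySem.Dict String (List String))
    (st : PySem.Dict String (List String) × PySem.Dict String (PySem.Set String)) : Prop :=
  st.1.items = c.items.map (fun kv => (kv.1, (pvD kv.2).2)) ∧
  st.2.items = c.items.map (fun kv => (kv.1, (pvD kv.2).1))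

lemma pv_get?_mapped {ν ν' : Type} (f : ν → ν') (c : PySem.Dict String ν) (e : PySem.Dict String ν')
    (h : e.items = c.items.map (fun kv => (kv.1, f kv.2))) (k : String) :
    e.get? k = (c.get? k).map f := by
  obtain ⟨l⟩ := c; obtain ⟨m⟩ := e
  subst h
  simp [PySem.Dict.get?, List.find?_map, Function.comp_def]

lemma pv_contains_mapped {ν ν' : Type} (f : ν → ν') (c : PySem.Dict String ν) (e : PySem.Dict String ν')
    (h : e.items = c.items.map (fun kv => (kv.1, f kv.2))) (k : String) :
    e.contains k = c.contains k := by
  obtain ⟨l⟩ := c; obtain ⟨m⟩ := e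
  subst h
  simp [PySem.Dict.contains, List.any_map, Function.comp_def]

lemma pv_getD_mapped {ν ν' : Type} (f : ν → ν') (c : PySem.Dict String ν) (e : PySem.Dict String ν')
    (h : e.items = c.items.map (fun kv => (kv.1, f kv.2))) (k : String) (d : ν) :
    e.getD k (f d) = f (c.getD k d) := by
  simp only [PySem.Dict.getD, pv_get?_mapped f c e h k]
  cases c.get? k <;> simp

lemma pv_items_insert_mapped {ν ν' : Type} (f : ν → ν') (c : PySem.Dict String ν) (e : PySem.Dict String ν')
    (h : e.items = c.items.map (fun kv => (kv.1, f kv.2))) (k : String) (v : ν) :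
    (e.insert k (f v)).items = (c.insert k v).items.map (fun kv => (kv.1, f kv.2)) := by
  have hc := pv_contains_mapped f c e h k
  obtain ⟨l⟩ := c; obtain ⟨m⟩ := e
  subst h
  simp only [PySem.Dict.insert, hc]
  by_cases hck : (PySem.Dict.mk l).contains k
  · simp only [hck, if_true, List.map_map]
    congr 1
    funext p
    by_cases hp : p.1 = k <;> simp [hp]
  · simp [hck]

lemma pv_inv_Bstep (summary : List (String × List String)) (c : PySem.Dict String (List String))
    (st : PySem.Dict String (List String) × PySem.Dict String (PySem.Set String)) (sec : String)
    (h : pvInv c st) : pvInv (pvAstep summary c sec) (pvBstep summary st sec) := by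
  obtain ⟨h1, h2⟩ := h
  have hg1 : PySem.Dict.getD st.1 sec [] = (pvD (c.getD sec [])).2 := by
    have := pv_getD_mapped (fun v => (pvD v).2) c st.1 h1 sec []
    simpa [pvD] using this
  have hg2 : PySem.Dict.getD st.2 sec PySem.Set.empty = (pvD (c.getD sec [])).1 := by
    have := pv_getD_mapped (fun v => (pvD v).1) c st.2 h2 sec []
    simpa [pvD] using this
  have hp : ((PySem.Dict.getD (PySem.Dict.mk summary) sec []).foldl pvStep
      (PySem.Dict.getD st.2 sec PySem.Set.empty, PySem.Dict.getD st.1 sec []))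
      = pvD (c.getD sec [] ++ PySem.Dict.getD (PySem.Dict.mk summary) sec []) := by
    rw [hg1, hg2, Prod.mk.eta]
    simp only [pvD, List.foldl_append]
  constructor
  · have := pv_items_insert_mapped (fun v => (pvD v).2) c st.1 h1 sec
      (c.getD sec [] ++ PySem.Dict.getD (PySem.Dict.mk summary) sec [])
    simp only [pvBstep, pvAstep, hp]
    exact this
  · have := pv_items_insert_mapped (fun v => (pvD v).1) c st.2 h2 sec
      (c.getD sec [] ++ PySem.Dict.getD (PySem.Dict.mk summary) sec [])
    simp only [pvBstep, pvAstep, hp]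
    exact this

lemma pv_inv_sections (summary : List (String × List String)) :
    ∀ (secs : List String) (c : PySem.Dict String (List String))
      (st : PySem.Dict String (List String) × PySem.Dict String (PySem.Set String)),
      pvInv c st → pvInv (secs.foldl (pvAstep summary) c) (secs.foldl (pvBstep summary) st) := by
  intro secs
  induction secs with
  | nil => intro c st h; exact h
  | cons sec rest ih =>
      intro c st h
      exact ih _ _ (pv_inv_Bstep summary c st sec h)

lemma pv_inv_summaries :
    ∀ (summaries : List (List (String × List String))) (c : PySem.Dict String (List String))
      (st : PySem.Dict String (List String) × PySem.Dict String (PySem.Set String)),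
      pvInv c st →
      pvInv (summaries.foldl (fun c summary => pvSectionNames.foldl (pvAstep summary) c) c)
            (summaries.foldl (fun st summary => pvSectionNames.foldl (pvBstep summary) st) st) := by
  intro summaries
  induction summaries with
  | nil => intro c st h; exact h
  | cons summary rest ih =>
      intro c st h
      exact ih _ _ (pv_inv_sections summary pvSectionNames c st h)

-- ===== VERDICT (by name: the statement is the Claim_ definition above) =====
theorem gather_section_items_spec : Claim_equal_gather_section_items := by
  intro summaries _
  show gather_section_items summaries = gather_section_items_alt summaries
  have h := pv_inv_summaries summaries PySem.Dict.empty (PySem.Dict.empty, PySem.Dict.empty)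
    ⟨rfl, rfl⟩
  have hA : gather_section_items summaries =
      (summaries.foldl (fun c summary => pvSectionNames.foldl (pvAstep summary) c)
        PySem.Dict.empty).items.map (fun kv => (kv.1, (pvD kv.2).2)) := rfl
  have hB : gather_section_items_alt summaries =
      (summaries.foldl (fun st summary => pvSectionNames.foldl (pvBstep summary) st)
        (PySem.Dict.empty, PySem.Dict.empty)).1.items := rfl
  rw [hA, hB, h.1]
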